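-- pv_equiv track=rewrite | github.com/med13foundation/monorepo | src/database/url_resolver.py | to_async_database_url
-- ===== SOURCE A (Python) =====
-- def to_async_database_url(sync_url: str) -> str:
--     """
--     Convert a synchronous SQLAlchemy URL into its async counterpart.
--
--     Examples:
--         postgresql:// -> postgresql+asyncpg://
--         postgresql+psycopg2:// -> postgresql+asyncpg://
--     """
--     passthrough_prefixes = ("postgresql+asyncpg",)
--     if sync_url.startswith(passthrough_prefixes):
--         return sync_url
--
--     replacements = (
--         ("postgresql+psycopg2://", "postgresql+asyncpg://"),
--         ("postgresql+psycopg://", "postgresql+asyncpg://"),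
--         ("postgresql://", "postgresql+asyncpg://"),
--     )
--
--     for prefix, replacement in replacements:
--         if sync_url.startswith(prefix):
--             return sync_url.replace(prefix, replacement, 1)
--
--     return sync_url
-- ===== SOURCE B (Python) =====
-- def to_async_database_url(sync_url: str) -> str:
--     """Parse the scheme once (partition on '://'), then look it up."""
--     scheme, sep, rest = sync_url.partition("://")
--     if not sep:
--         return sync_url
--     if scheme.startswith("postgresql+asyncpg"):
--         return sync_url
--     if scheme in ("postgresql+psycopg2", "postgresql+psycopg", "postgresql"):
--         return "postgresql+asyncpg://" + rest
--     return sync_url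
-- ===== Notes on version B (the rewrite author's own statement) =====
-- stated objective: simpler
-- what changed: B splits the URL once at the scheme separator with str.partition and looks the extracted scheme up in a tuple of sync scheme names, instead of A's ordered chain of startswith probes followed by str.replace with count 1.
import Mathlib
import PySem

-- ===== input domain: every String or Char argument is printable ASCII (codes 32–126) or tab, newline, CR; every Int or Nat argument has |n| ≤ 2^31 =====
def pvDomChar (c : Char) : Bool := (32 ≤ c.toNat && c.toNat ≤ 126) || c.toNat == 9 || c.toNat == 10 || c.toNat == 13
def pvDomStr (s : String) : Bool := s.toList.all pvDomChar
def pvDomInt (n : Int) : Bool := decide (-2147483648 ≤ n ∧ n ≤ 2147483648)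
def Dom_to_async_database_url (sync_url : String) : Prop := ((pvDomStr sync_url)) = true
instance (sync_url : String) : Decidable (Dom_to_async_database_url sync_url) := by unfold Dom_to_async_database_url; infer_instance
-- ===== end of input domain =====

-- B parses the scheme once ('partition' on "://" then a lookup) instead of A's ordered
-- sequence of startswith probes; equivalent on all inputs, same return value.

-- ===== PORT A =====
-- s.replace(old, new, 1): hand port (PySem.Str.replace carries no count);
-- exact for nonempty old, which is the only way A calls it.
def pyReplace1 (s old new : List Char) : List Char :=
  let i := PySem.Chars.find s old
  if i = -1 then s else s.take i.toNat ++ new ++ s.drop (i.toNat + old.length)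

-- the 'for prefix, replacement in replacements' loop with its early return
def aLoop (sync_url : String) : List (String × String) → String
  | [] => sync_url
  | (pre, repl) :: rest =>
      if PySem.Str.startswith sync_url pre then
        String.ofList (pyReplace1 sync_url.toList pre.toList repl.toList)
      else aLoop sync_url rest

def to_async_database_url (sync_url : String) : String :=
  if PySem.Str.startswith sync_url "postgresql+asyncpg" then sync_url
  else aLoop sync_url
    [("postgresql+psycopg2://", "postgresql+asyncpg://"),
     ("postgresql+psycopg://", "postgresql+asyncpg://"),
     ("postgresql://", "postgresql+asyncpg://")]

-- ===== PORT B =====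
-- str.partition("://"): hand port via the first occurrence (exact for a nonempty
-- separator); the middle component is modelled as the Bool 'sep was found',
-- which is all Source B tests ('if not sep').
def pyPartitionSep (cs : List Char) : List Char × Bool × List Char :=
  let i := PySem.Chars.find cs [':', '/', '/']
  if i = -1 then (cs, false, [])
  else (cs.take i.toNat, true, cs.drop (i.toNat + 3))

def to_async_database_url_alt (sync_url : String) : String :=
  let p := pyPartitionSep sync_url.toList
  if p.2.1 = false then sync_url
  else if PySem.Chars.startswith p.1 "postgresql+asyncpg".toList then sync_url
  else if [String.toList "postgresql+psycopg2", String.toList "postgresql+psycopg",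
           String.toList "postgresql"].contains p.1 then
    String.ofList ("postgresql+asyncpg://".toList ++ p.2.2)
  else sync_url

-- ===== PRECONDITION & SPEC =====
def Spec_to_async_database_url (sync_url : String) (out : String) : Prop := out = to_async_database_url_alt sync_url
instance (sync_url : String) (out : String) : Decidable (Spec_to_async_database_url sync_url out) := by unfold Spec_to_async_database_url; infer_instance

-- ===== CLAIM (what is proved, stated in full; the proofs are below) =====
def Claim_equal_to_async_database_url : Prop := ∀ (sync_url : String), Dom_to_async_database_url sync_url → Spec_to_async_database_url sync_url (to_async_database_url sync_url)

-- ===== LEMMAS AND PROOFS =====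

-- s.find(sub) = 0 when sub is a prefix of s
theorem find_eq_zero_of_prefix (s sub : List Char) (h : sub <+: s) :
    PySem.Chars.find s sub = 0 := by
  have h0 : (0 : Int) ≤ PySem.Chars.find s sub :=
    (PySem.Chars.find_nonneg_iff s sub).mpr h.isInfix
  obtain ⟨-, hmin⟩ := PySem.Chars.find_spec h0
  by_contra hne
  have hpos : 0 < (PySem.Chars.find s sub).toNat := by omega
  exact hmin 0 hpos (by simpa using h)

-- if "://" occurs at position t then s has ':' at index t
theorem colon_at (s : List Char) (t : Nat) (h : [':', '/', '/'] <+: s.drop t) :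
    s[t]? = some ':' := by
  obtain ⟨u, hu⟩ := h
  have h0 : (s.drop t)[0]? = some ':' := by rw [← hu]; rfl
  simpa [List.getElem?_drop] using h0

-- decomposition of s at the first "://"
theorem decomp (s : List Char) (t : Nat) (h : [':', '/', '/'] <+: s.drop t) :
    s = s.take t ++ ':' :: '/' :: '/' :: s.drop (t + 3) := by
  obtain ⟨u, hu⟩ := h
  have hd : s.drop (t + 3) = u := by
    have h33 : s.drop (t + 3) = (s.drop t).drop 3 := by rw [List.drop_drop]
    rw [h33, ← hu]; rfl
  conv_lhs => rw [← List.take_append_drop t s]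
  rw [← hu, hd]; rfl

-- the first "://" in p ++ "://" ++ r is at p.length when p has no ':'
theorem find3_of_shape (p r : List Char) (hp : ':' ∉ p) :
    PySem.Chars.find (p ++ ':' :: '/' :: '/' :: r) [':', '/', '/'] = (p.length : Int) := by
  set s := p ++ ':' :: '/' :: '/' :: r with hs
  have hpre : [':', '/', '/'] <+: s.drop p.length := by
    rw [hs, List.drop_left]
    exact ⟨r, rfl⟩
  have h0 : (0 : Int) ≤ PySem.Chars.find s [':', '/', '/'] :=
    (PySem.Chars.find_nonneg_iff s _).mpr (List.IsInfix.trans hpre.isInfix (List.drop_suffix _ _).isInfix)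
  obtain ⟨hat, hmin⟩ := PySem.Chars.find_spec h0
  set t := (PySem.Chars.find s [':', '/', '/']).toNat with ht
  have hle : t ≤ p.length := by
    by_contra hgt
    exact hmin p.length (by omega) hpre
  have hEq : t = p.length := by
    rcases Nat.lt_or_ge t p.length with hlt | hge
    · exfalso
      have hc := colon_at s t hat
      have hgp : s[t]? = p[t]? := by rw [hs]; exact List.getElem?_append_left hlt
      rw [hgp] at hc
      exact hp (List.mem_of_getElem? hc)
    · omega
  omega

-- "://" cannot occur strictly inside a colon-free prefix of s
theorem length_le_of_prefix_nocolon (s P : List Char) (t : Nat) (hP : P <+: s)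
    (hc : ':' ∉ P) (h3 : [':', '/', '/'] <+: s.drop t) : P.length ≤ t := by
  by_contra hgt
  have hlt : t < P.length := by omega
  have hcol := colon_at s t h3
  obtain ⟨u, hu⟩ := hP
  have hgp : s[t]? = P[t]? := by rw [← hu]; exact List.getElem?_append_left hlt
  rw [hgp] at hcol
  exact hc (List.mem_of_getElem? hcol)

-- ===== VERDICT (by name: the statement is the Claim_ definition above) =====
theorem to_async_database_url_spec : Claim_equal_to_async_database_url := by
  intro sync_url _
  show to_async_database_url sync_url = to_async_database_url_alt sync_url
  by_cases h1 : PySem.Chars.startswith sync_url.toList "postgresql+asyncpg".toList = true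
  · -- A's passthrough: B also leaves the URL unchanged
    by_cases hf : PySem.Chars.find sync_url.toList [':', '/', '/'] = -1
    · simp only [to_async_database_url, to_async_database_url_alt, aLoop, pyPartitionSep,
        PySem.Str.startswith_eq]
      simp at h1
      simp [h1, hf]
    · have h0 : (0 : Int) ≤ PySem.Chars.find sync_url.toList [':', '/', '/'] := by
        have := PySem.Chars.neg_one_le_find sync_url.toList [':', '/', '/']
        omega
      obtain ⟨hat, -⟩ := PySem.Chars.find_spec h0
      have hP : "postgresql+asyncpg".toList <+: sync_url.toList :=
        (PySem.Chars.startswith_iff _ _).mp h1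
      have hsch : PySem.Chars.startswith
          (sync_url.toList.take (PySem.Chars.find sync_url.toList [':', '/', '/']).toNat)
          "postgresql+asyncpg".toList = true :=
        (PySem.Chars.startswith_iff _ _).mpr (List.prefix_take_iff.mpr ⟨hP,
          length_le_of_prefix_nocolon sync_url.toList "postgresql+asyncpg".toList
            (PySem.Chars.find sync_url.toList [':', '/', '/']).toNat hP (by decide) hat⟩)
      simp only [to_async_database_url, to_async_database_url_alt, aLoop, pyPartitionSep,
        PySem.Str.startswith_eq]
      simp at h1 hsch
      simp [h1, hf, hsch]
  · by_cases h2 : PySem.Chars.startswith sync_url.toList "postgresql+psycopg2://".toList = true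
    · -- replacement hit: postgresql+psycopg2://
      obtain ⟨u, hu⟩ := (PySem.Chars.startswith_iff _ _).mp h2
      have hshape : sync_url.toList = "postgresql+psycopg2".toList ++ ':' :: '/' :: '/' :: u := by
        rw [← hu]; rfl
      have hfind : PySem.Chars.find sync_url.toList [':', '/', '/'] =
          (("postgresql+psycopg2".toList.length : Nat) : Int) := by
        rw [hshape]; exact find3_of_shape _ _ (by decide)
      have hfA : PySem.Chars.find sync_url.toList "postgresql+psycopg2://".toList = 0 :=
        find_eq_zero_of_prefix _ _ ⟨u, hu⟩
      rw [hshape] at hfind hfA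
      simp only [to_async_database_url, to_async_database_url_alt, aLoop, pyReplace1,
        pyPartitionSep, PySem.Str.startswith_eq]
      rw [hshape]
      simp at hfind hfA
      simp [hfind, hfA, PySem.Chars.startswith, List.isPrefixOf]
    · by_cases h3 : PySem.Chars.startswith sync_url.toList "postgresql+psycopg://".toList = true
      · -- replacement hit: postgresql+psycopg://
        obtain ⟨u, hu⟩ := (PySem.Chars.startswith_iff _ _).mp h3
        have hshape : sync_url.toList = "postgresql+psycopg".toList ++ ':' :: '/' :: '/' :: u := by
          rw [← hu]; rfl
        have hfind : PySem.Chars.find sync_url.toList [':', '/', '/'] =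
            (("postgresql+psycopg".toList.length : Nat) : Int) := by
          rw [hshape]; exact find3_of_shape _ _ (by decide)
        have hfA : PySem.Chars.find sync_url.toList "postgresql+psycopg://".toList = 0 :=
          find_eq_zero_of_prefix _ _ ⟨u, hu⟩
        rw [hshape] at hfind hfA
        simp only [to_async_database_url, to_async_database_url_alt, aLoop, pyReplace1,
          pyPartitionSep, PySem.Str.startswith_eq]
        rw [hshape]
        simp at hfind hfA
        simp [hfind, hfA, PySem.Chars.startswith, List.isPrefixOf]
      · by_cases h4 : PySem.Chars.startswith sync_url.toList "postgresql://".toList = true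
        · -- replacement hit: postgresql://
          obtain ⟨u, hu⟩ := (PySem.Chars.startswith_iff _ _).mp h4
          have hshape : sync_url.toList = "postgresql".toList ++ ':' :: '/' :: '/' :: u := by
            rw [← hu]; rfl
          have hfind : PySem.Chars.find sync_url.toList [':', '/', '/'] =
              (("postgresql".toList.length : Nat) : Int) := by
            rw [hshape]; exact find3_of_shape _ _ (by decide)
          have hfA : PySem.Chars.find sync_url.toList "postgresql://".toList = 0 :=
            find_eq_zero_of_prefix _ _ ⟨u, hu⟩
          rw [hshape] at hfind hfA
          simp only [to_async_database_url, to_async_database_url_alt, aLoop, pyReplace1,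
            pyPartitionSep, PySem.Str.startswith_eq]
          rw [hshape]
          simp at hfind hfA
          simp [hfind, hfA, PySem.Chars.startswith, List.isPrefixOf]
        · -- no prefix matches: both leave the URL unchanged
          by_cases hf : PySem.Chars.find sync_url.toList [':', '/', '/'] = -1
          · simp only [to_async_database_url, to_async_database_url_alt, aLoop, pyPartitionSep,
              PySem.Str.startswith_eq]
            simp at h1 h2 h3 h4
            simp [h1, h2, h3, h4, hf]
          · have h0 : (0 : Int) ≤ PySem.Chars.find sync_url.toList [':', '/', '/'] := by
              have := PySem.Chars.neg_one_le_find sync_url.toList [':', '/', '/']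
              omega
            obtain ⟨hat, -⟩ := PySem.Chars.find_spec h0
            have hdec := decomp sync_url.toList
              (PySem.Chars.find sync_url.toList [':', '/', '/']).toNat hat
            -- the scheme cannot start with "postgresql+asyncpg": the whole URL would
            have hb1 : PySem.Chars.startswith
                (sync_url.toList.take (PySem.Chars.find sync_url.toList [':', '/', '/']).toNat)
                "postgresql+asyncpg".toList = false := by
              rw [Bool.eq_false_iff]
              intro hc
              exact h1 ((PySem.Chars.startswith_iff _ _).mpr
                (((PySem.Chars.startswith_iff _ _).mp hc).trans (List.take_prefix _ _)))
            -- nor can the scheme equal a sync name: the URL would carry its prefix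
            have key : ∀ (lit : List Char),
                sync_url.toList.take (PySem.Chars.find sync_url.toList [':', '/', '/']).toNat = lit →
                (lit ++ ':' :: '/' :: '/' :: []) <+: sync_url.toList := by
              intro lit hc
              refine ⟨sync_url.toList.drop ((PySem.Chars.find sync_url.toList [':', '/', '/']).toNat + 3), ?_⟩
              conv_rhs => rw [hdec, hc]
              simp
            have hne2 : sync_url.toList.take (PySem.Chars.find sync_url.toList [':', '/', '/']).toNat
                ≠ "postgresql+psycopg2".toList := fun hc =>
              h2 ((PySem.Chars.startswith_iff _ _).mpr (key _ hc))
            have hne3 : sync_url.toList.take (PySem.Chars.find sync_url.toList [':', '/', '/']).toNat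
                ≠ "postgresql+psycopg".toList := fun hc =>
              h3 ((PySem.Chars.startswith_iff _ _).mpr (key _ hc))
            have hne4 : sync_url.toList.take (PySem.Chars.find sync_url.toList [':', '/', '/']).toNat
                ≠ "postgresql".toList := fun hc =>
              h4 ((PySem.Chars.startswith_iff _ _).mpr (key _ hc))
            simp only [to_async_database_url, to_async_database_url_alt, aLoop, pyPartitionSep,
              PySem.Str.startswith_eq]
            simp at h1 h2 h3 h4 hb1 hne2 hne3 hne4
            simp [h1, h2, h3, h4, hf, hb1, hne2, hne3, hne4]
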